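-- pv_equiv track=rewrite | github.com/The-Masketta-Man/dictionary_parsing | scripts/vewsqu/gram_tags.py | _get_bold_phrases
-- ===== SOURCE A (Python) =====
-- def _get_bold_phrases(full_text, bold_flags):
--     phrases = []
--     current_phrase = ""
--     start_idx = -1
--
--     for i, char in enumerate(full_text):
--         if bold_flags[i]:
--             if not current_phrase:
--                 start_idx = i
--             current_phrase += char
--         else:
--             if current_phrase.strip():
--                 phrases.append((current_phrase.strip(), start_idx))
--             current_phrase = ""
--
--     if current_phrase.strip():
--         phrases.append((current_phrase.strip(), start_idx))
--
--     return phrases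
-- ===== SOURCE B (Python) =====
-- def _get_bold_phrases(full_text, bold_flags):
--     # Boundary scan: find each maximal run [s, e) of bold indices, slice it out once.
--     n = len(full_text)
--     phrases = []
--     s = 0
--     while s < n:
--         if bold_flags[s]:
--             e = s + 1
--             while e < n and bold_flags[e]:
--                 e += 1
--             stripped = full_text[s:e].strip()
--             if stripped:
--                 phrases.append((stripped, s))
--             s = e
--         else:
--             s += 1
--     return phrases
-- ===== Notes on version B (the rewrite author's own statement) =====
-- stated objective: alternative
-- what changed: Replaces A's char-by-char accumulator state machine (current phrase string + start index carried through every character) with a boundary scan that locates each maximal run [s,e) of bold indices and slices/strips it in one step; Pre_ excludes only inputs where both raise IndexError (bold_flags shorter than full_text).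
import Mathlib
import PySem

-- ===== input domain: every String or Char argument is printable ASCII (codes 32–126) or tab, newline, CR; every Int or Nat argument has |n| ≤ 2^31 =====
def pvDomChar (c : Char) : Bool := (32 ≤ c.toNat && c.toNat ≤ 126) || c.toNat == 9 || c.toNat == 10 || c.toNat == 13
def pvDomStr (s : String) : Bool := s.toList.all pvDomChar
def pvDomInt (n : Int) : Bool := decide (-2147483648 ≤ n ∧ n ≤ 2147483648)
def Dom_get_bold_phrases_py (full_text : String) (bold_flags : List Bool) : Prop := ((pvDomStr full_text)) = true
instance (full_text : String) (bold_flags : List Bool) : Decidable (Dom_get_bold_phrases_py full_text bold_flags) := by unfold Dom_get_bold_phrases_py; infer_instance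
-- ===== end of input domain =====

-- B replaces A's per-character accumulator state machine by a boundary scan over maximal bold runs (alternative decomposition, same result).

-- ===== PORT A =====
-- flush of A's current phrase: append (current.strip(), start_idx) if the strip is non-empty
def flushA (cur : List Char) (st : Int) : List (String × Int) :=
  if PySem.Chars.strip cur ≠ [] then [(String.mk (PySem.Chars.strip cur), st)] else []

-- one iteration of A's for-loop; state = (phrases, current_phrase, start_idx)
def stepA (flags : List Bool) (st : List (String × Int) × List Char × Int) (ic : Int × Char) :
    List (String × Int) × List Char × Int :=
  if ((PySem.List.pyGet? flags ic.1).getD false) then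
    (st.1, st.2.1 ++ [ic.2], if st.2.1 = [] then ic.1 else st.2.2)
  else
    (st.1 ++ flushA st.2.1 st.2.2, [], st.2.2)

def get_bold_phrases_py (full_text : String) (bold_flags : List Bool) : List (String × Int) :=
  let st := (PySem.List.enumerate full_text.toList 0).foldl (stepA bold_flags) ([], [], -1)
  st.1 ++ flushA st.2.1 st.2.2

-- ===== PORT B =====
-- inner while: advance e while e < n and bold_flags[e]
def scanEndB (text : List Char) (flags : List Bool) (e : Nat) : Nat :=
  if e < text.length ∧ flags.getD e false = true then scanEndB text flags (e + 1) else e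
termination_by text.length - e
decreasing_by omega

theorem scanEndB_ge (text : List Char) (flags : List Bool) (b : Nat) :
    b ≤ scanEndB text flags b := by
  rw [scanEndB]; split
  · exact le_trans (by omega) (scanEndB_ge text flags (b + 1))
  · exact le_refl b
termination_by text.length - b
decreasing_by omega

-- outer while over s
def loopB (text : List Char) (flags : List Bool) (s : Nat) : List (String × Int) :=
  if s < text.length then
    if flags.getD s false then
      let e := scanEndB text flags (s + 1)
      let stripped := PySem.Chars.strip (PySem.List.slice text (some (s : Int)) (some (e : Int)))
      (if stripped ≠ [] then [(String.mk stripped, (s : Int))] else []) ++ loopB text flags e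
    else loopB text flags (s + 1)
  else []
termination_by text.length - s
decreasing_by
  · have := scanEndB_ge text flags (s + 1); omega
  · omega

def get_bold_phrases_py_alt (full_text : String) (bold_flags : List Bool) : List (String × Int) :=
  loopB full_text.toList bold_flags 0

-- ===== PRECONDITION & SPEC =====
-- Pre_ excludes exactly the inputs where Python A raises IndexError (bold_flags shorter than full_text); B raises there too.
def Pre_get_bold_phrases_py (full_text : String) (bold_flags : List Bool) : Prop :=
  full_text.toList.length ≤ bold_flags.length
instance (full_text : String) (bold_flags : List Bool) : Decidable (Pre_get_bold_phrases_py full_text bold_flags) := by unfold Pre_get_bold_phrases_py; infer_instance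

def pvWitness_get_bold_phrases_py : String × List Bool := ("a b", [true, true, true])

def Spec_get_bold_phrases_py (full_text : String) (bold_flags : List Bool) (out : List (String × Int)) : Prop := out = get_bold_phrases_py_alt full_text bold_flags
instance (full_text : String) (bold_flags : List Bool) (out : List (String × Int)) : Decidable (Spec_get_bold_phrases_py full_text bold_flags out) := by unfold Spec_get_bold_phrases_py; infer_instance

-- ===== CLAIM (what is proved, stated in full; the proofs are below) =====
def Claim_equal_get_bold_phrases_py : Prop := ∀ (full_text : String) (bold_flags : List Bool), Dom_get_bold_phrases_py full_text bold_flags → Pre_get_bold_phrases_py full_text bold_flags → Spec_get_bold_phrases_py full_text bold_flags (get_bold_phrases_py full_text bold_flags)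

-- ===== LEMMAS AND PROOFS =====

theorem scanEndB_le (text : List Char) (flags : List Bool) (b : Nat) (hb : b ≤ text.length) :
    scanEndB text flags b ≤ text.length := by
  rw [scanEndB]; split
  · exact scanEndB_le text flags (b + 1) (by omega)
  · exact hb
termination_by text.length - b
decreasing_by omega

theorem scanEndB_run (text : List Char) (flags : List Bool) (b : Nat) :
    ∀ j, b ≤ j → j < scanEndB text flags b → flags.getD j false = true := by
  rw [scanEndB]; split
  · rename_i hcond
    intro j hbj hj
    rcases Nat.eq_or_lt_of_le hbj with h | h
    · exact h ▸ hcond.2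
    · exact scanEndB_run text flags (b + 1) j h hj
  · intro j hbj hj; omega
termination_by text.length - b
decreasing_by omega

theorem scanEndB_stop (text : List Char) (flags : List Bool) (b : Nat)
    (h : scanEndB text flags b < text.length) :
    flags.getD (scanEndB text flags b) false = false := by
  by_cases hc : b < text.length ∧ flags.getD b false = true
  · rw [scanEndB, if_pos hc] at h ⊢
    exact scanEndB_stop text flags (b + 1) h
  · rw [scanEndB, if_neg hc] at h ⊢
    cases hfb : flags.getD b false
    · rfl
    · exact absurd ⟨h, hfb⟩ hc
termination_by text.length - b
decreasing_by omega

theorem strip_nil : PySem.Chars.strip [] = [] := by decide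

-- A's fold over a fully-bold segment just appends the segment to the current phrase
theorem runA (flags : List Bool) (seg : List Char) :
    ∀ (a : Nat) (acc : List (String × Int)) (cur : List Char) (st : Int), cur ≠ [] →
    (∀ k, k < seg.length → flags.getD (a + k) false = true) →
    (PySem.List.enumerate seg (a : Int)).foldl (stepA flags) (acc, cur, st) = (acc, cur ++ seg, st) := by
  induction seg with
  | nil => intro a acc cur st _ _; simp [PySem.List.enumerate_nil]
  | cons c tl ih =>
    intro a acc cur st hcur hflag
    rw [PySem.List.enumerate_cons, List.foldl_cons]
    have h0 : flags[a]?.getD false = true := by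
      simpa [List.getD_eq_getElem?_getD] using hflag 0 (by simp)
    have hstep : stepA flags (acc, cur, st) ((a : Int), c) = (acc, cur ++ [c], st) := by
      simp [stepA, h0, hcur]
    rw [hstep]
    have : ((a : Int) + 1) = ((a + 1 : Nat) : Int) := by push_cast; ring
    rw [this, ih (a + 1) acc (cur ++ [c]) st (by simp) (fun k hk => by
      have := hflag (k + 1) (by simpa using Nat.succ_lt_succ hk)
      simpa [Nat.add_assoc, Nat.add_comm 1 k] using this)]
    simp

theorem mainLoop (text : List Char) (flags : List Bool) (s : Nat) (acc : List (String × Int)) (st0 : Int) :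
    (((PySem.List.enumerate (text.drop s) (s : Int)).foldl (stepA flags) (acc, ([] : List Char), st0)).1
      ++ flushA ((PySem.List.enumerate (text.drop s) (s : Int)).foldl (stepA flags) (acc, ([] : List Char), st0)).2.1
               ((PySem.List.enumerate (text.drop s) (s : Int)).foldl (stepA flags) (acc, ([] : List Char), st0)).2.2)
    = acc ++ loopB text flags s := by
  by_cases hs : s < text.length
  · have hgetc : text.drop s = text[s] :: text.drop (s + 1) := List.drop_eq_getElem_cons hs
    by_cases hf : flags.getD s false = true
    · -- bold run starting at s
      have he1 : s + 1 ≤ scanEndB text flags (s + 1) := scanEndB_ge text flags (s + 1)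
      have heL : scanEndB text flags (s + 1) ≤ text.length := scanEndB_le text flags (s + 1) (by omega)
      set e := scanEndB text flags (s + 1) with he
      set seg := (text.drop (s + 1)).take (e - (s + 1)) with hseg
      have hlenseg : seg.length = e - (s + 1) := by
        rw [hseg, List.length_take, List.length_drop]; omega
      have hdecomp : text.drop (s + 1) = seg ++ text.drop e := by
        rw [hseg]
        conv_lhs => rw [← List.take_append_drop (e - (s + 1)) (text.drop (s + 1))]
        congr 1
        rw [List.drop_drop]
        congr 1
        omega
      have hcs : text[s] :: seg = (text.drop s).take (e - s) := by
        rw [hgetc]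
        have : e - s = (e - (s + 1)) + 1 := by omega
        rw [this, List.take_succ_cons, hseg]
      have hslice : PySem.List.slice text (some (s : Int)) (some (e : Int))
          = text[s] :: seg := by
        rw [PySem.List.slice_natCast, ← hcs]
      -- unroll the first step of A's fold
      rw [hgetc, PySem.List.enumerate_cons, List.foldl_cons]
      have hstep1 : stepA flags (acc, ([] : List Char), st0) ((s : Int), text[s]) = (acc, [text[s]], (s : Int)) := by
        have hf' : flags[s]?.getD false = true := by
          simpa [List.getD_eq_getElem?_getD] using hf
        simp [stepA, hf']
      rw [hstep1]
      have hcast1 : ((s : Int) + 1) = ((s + 1 : Nat) : Int) := by push_cast; ring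
      rw [hcast1, hdecomp, PySem.List.enumerate_append, List.foldl_append]
      have hrun : (PySem.List.enumerate seg ((s + 1 : Nat) : Int)).foldl (stepA flags)
          (acc, [text[s]], (s : Int)) = (acc, text[s] :: seg, (s : Int)) := by
        have := runA flags seg (s + 1) acc [text[s]] (s : Int) (by simp)
          (fun k hk => scanEndB_run text flags (s + 1) (s + 1 + k) (by omega) (by omega))
        simpa using this
      rw [hrun]
      have hcast2 : (((s + 1 : Nat) : Int) + (seg.length : Int)) = ((e : Nat) : Int) := by
        rw [hlenseg]; push_cast; omega
      rw [hcast2]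
      -- unfold B once
      rw [loopB]
      rw [if_pos hs, if_pos hf]
      simp only [← he, hslice]
      by_cases he2 : e < text.length
      · have hfe : flags.getD e false = false := scanEndB_stop text flags (s + 1) he2
        have hgete : text.drop e = text[e] :: text.drop (e + 1) := List.drop_eq_getElem_cons he2
        rw [hgete, PySem.List.enumerate_cons, List.foldl_cons]
        have hfe' : flags[e]?.getD false = false := by
          simpa [List.getD_eq_getElem?_getD] using hfe
        have hstep2 : stepA flags (acc, text[s] :: seg, (s : Int)) (((e : Nat) : Int), text[e])
            = (acc ++ flushA (text[s] :: seg) (s : Int), [], (s : Int)) := by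
          simp [stepA, hfe']
        rw [hstep2]
        have hcast3 : (((e : Nat) : Int) + 1) = ((e + 1 : Nat) : Int) := by push_cast; ring
        rw [hcast3, mainLoop text flags (e + 1) (acc ++ flushA (text[s] :: seg) (s : Int)) (s : Int)]
        -- B side: loopB e = loopB (e+1) since flag e is false
        have hlbe : loopB text flags e = loopB text flags (e + 1) := by
          rw [loopB, if_pos he2]; simp [List.getD_eq_getElem?_getD, hfe']
        rw [hlbe]
        simp [flushA, List.append_assoc]
      · have hde : text.drop e = [] := List.drop_eq_nil_of_le (by omega)
        have hlb : loopB text flags e = [] := by rw [loopB, if_neg he2]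
        rw [hde, PySem.List.enumerate_nil, List.foldl_nil, hlb]
        simp [flushA]
    · -- not bold at s: flush of empty phrase is a no-op
      rw [hgetc, PySem.List.enumerate_cons, List.foldl_cons]
      have hf' : flags[s]?.getD false = false := by
        simpa [List.getD_eq_getElem?_getD] using (Bool.not_eq_true _).mp hf
      have hstep : stepA flags (acc, ([] : List Char), st0) ((s : Int), text[s]) = (acc, [], st0) := by
        simp [stepA, hf', flushA, strip_nil]
      rw [hstep]
      have hcast1 : ((s : Int) + 1) = ((s + 1 : Nat) : Int) := by push_cast; ring
      rw [hcast1, mainLoop text flags (s + 1) acc st0]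
      have hlb : loopB text flags s = loopB text flags (s + 1) := by
        rw [loopB, if_pos hs]; simp [List.getD_eq_getElem?_getD, hf']
      rw [hlb]
  · have hd : text.drop s = [] := List.drop_eq_nil_of_le (by omega)
    rw [loopB, if_neg hs, hd, PySem.List.enumerate_nil, List.foldl_nil]
    simp [flushA, strip_nil]
termination_by text.length - s
decreasing_by
  · omega
  · omega

-- ===== VERDICT (by name: the statement is the Claim_ definition above) =====
theorem get_bold_phrases_py_spec : Claim_equal_get_bold_phrases_py := by
  intro ft flags _ _
  unfold Spec_get_bold_phrases_py get_bold_phrases_py get_bold_phrases_py_alt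
  have := mainLoop ft.toList flags 0 [] (-1)
  simpa using this
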